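-- pv_equiv track=rewrite | github.com/salvotrifiro96-ux/funnel-refresher-agent | agent/launch.py | _next_referral_index
-- ===== SOURCE A (Python) =====
-- def _next_referral_index(existing_referrals: list[str], prefix: str) -> int:
--     """Find the next free index for `<prefix>_N` referral tags."""
--     used: set[int] = set()
--     for ref in existing_referrals:
--         if not ref.startswith(prefix + "_"):
--             continue
--         tail = ref[len(prefix) + 1 :]
--         if tail.isdigit():
--             used.add(int(tail))
--     n = 1
--     while n in used:
--         n += 1
--     return n
-- ===== SOURCE B (Python) =====
-- def _next_referral_index(existing_referrals: list[str], prefix: str) -> int: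
--     """Find the next free index for `<prefix>_N` referral tags."""
--     pat = prefix + "_"
--     vals: list[int] = []
--     for ref in existing_referrals:
--         if ref.startswith(pat):
--             tail = ref[len(prefix) + 1:]
--             if tail.isdigit():
--                 vals.append(int(tail))
--     vals.sort()
--     expected = 1
--     for v in vals:
--         if v < expected:
--             continue
--         if v == expected:
--             expected += 1
--         else:
--             break
--     return expected
-- ===== Notes on version B (the rewrite author's own statement) =====
-- stated objective: alternative
-- what changed: Replaces the hash-set plus membership-probing while-loop with collecting the parsed indices into a list, sorting it, and finding the smallest missing positive integer in one ordered scan with an 'expected' counter.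
import Mathlib
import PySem

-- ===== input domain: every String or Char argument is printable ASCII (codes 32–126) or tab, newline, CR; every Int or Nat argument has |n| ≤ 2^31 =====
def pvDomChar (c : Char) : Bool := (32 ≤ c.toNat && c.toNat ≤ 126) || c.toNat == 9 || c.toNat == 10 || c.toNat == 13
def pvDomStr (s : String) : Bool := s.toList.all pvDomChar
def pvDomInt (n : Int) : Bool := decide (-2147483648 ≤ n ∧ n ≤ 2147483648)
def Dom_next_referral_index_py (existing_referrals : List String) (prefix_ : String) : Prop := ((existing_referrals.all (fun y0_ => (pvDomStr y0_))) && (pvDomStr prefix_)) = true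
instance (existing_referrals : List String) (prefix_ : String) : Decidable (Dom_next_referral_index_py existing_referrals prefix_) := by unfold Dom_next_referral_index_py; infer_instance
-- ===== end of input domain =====

-- B replaces A's hash set + membership-probing while-loop by sort-then-ordered-scan
-- for the smallest missing positive integer (alternative algorithm, similar cost).

-- ===== PORT A =====
-- termination helper for A's `while n in used: n += 1` loop (cited by decreasing_by)
theorem pvFilterMono (l : List Int) (n : Int) :
    (l.filter (fun m => decide (n + 1 ≤ m))).length ≤ (l.filter (fun m => decide (n ≤ m))).length := by
  induction l with
  | nil => simp
  | cons a t ih =>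
    simp only [List.filter_cons, decide_eq_true_eq]
    by_cases h1 : n + 1 ≤ a
    · rw [if_pos h1, if_pos (by omega : n ≤ a)]
      simpa using ih
    · rw [if_neg h1]
      by_cases h2 : n ≤ a
      · rw [if_pos h2]
        exact le_trans ih (by simp)
      · rw [if_neg h2]
        exact ih

theorem pvFilterLt (l : List Int) (n : Int) (h : n ∈ l) :
    (l.filter (fun m => decide (n + 1 ≤ m))).length < (l.filter (fun m => decide (n ≤ m))).length := by
  induction l with
  | nil => cases h
  | cons a t ih =>
    simp only [List.filter_cons, decide_eq_true_eq]
    by_cases h1 : n + 1 ≤ a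
    · have hm : n ∈ t := by
        rcases List.mem_cons.mp h with rfl | hm
        · omega
        · exact hm
      rw [if_pos h1, if_pos (by omega : n ≤ a)]
      simpa using ih hm
    · rw [if_neg h1]
      by_cases h2 : n ≤ a
      · rw [if_pos h2]
        exact lt_of_le_of_lt (pvFilterMono t n) (by simp)
      · have hm : n ∈ t := by
          rcases List.mem_cons.mp h with rfl | hm
          · omega
          · exact hm
        rw [if_neg h2]
        exact ih hm

-- the `while n in used: n += 1` loop of A
def pyWhileFree (used : List Int) (n : Int) : Int :=
  if h : n ∈ used then pyWhileFree used (n + 1) else n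
termination_by (used.filter (fun m => decide (n ≤ m))).length
decreasing_by exact pvFilterLt used n h

def next_referral_index_py (existing_referrals : List String) (prefix_ : String) : Int :=
  -- used: set[int] built over the list (`continue` = keep acc); tail = ref[len(prefix)+1:]
  pyWhileFree
    (existing_referrals.foldl (fun acc ref =>
      if ¬ (PySem.Str.startswith ref (prefix_ ++ "_")) then acc
      else if PySem.Str.strIsdigit (PySem.Str.slice ref (some ((PySem.Str.len prefix_ : Int) + 1)) none) then
        PySem.Set.add acc ((PySem.Int.ofStr? (PySem.Str.slice ref (some ((PySem.Str.len prefix_ : Int) + 1)) none)).getD 0)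
      else acc) PySem.Set.empty) 1

-- ===== PORT B =====
-- the ordered scan with the `expected` counter (break = return current expected)
def pyScanExpected : List Int → Int → Int
  | [], e => e
  | v :: vs, e =>
    if v < e then pyScanExpected vs e
    else if v = e then pyScanExpected vs (e + 1)
    else e

def next_referral_index_py_alt (existing_referrals : List String) (prefix_ : String) : Int :=
  pyScanExpected
    (PySem.List.sorted
      (existing_referrals.foldl (fun acc ref =>
        if PySem.Str.startswith ref (prefix_ ++ "_") then
          if PySem.Str.strIsdigit (PySem.Str.slice ref (some ((PySem.Str.len prefix_ : Int) + 1)) none) then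
            acc ++ [(PySem.Int.ofStr? (PySem.Str.slice ref (some ((PySem.Str.len prefix_ : Int) + 1)) none)).getD 0]
          else acc
        else acc) [])
      (fun x => x) false) 1

-- ===== PRECONDITION & SPEC =====
def Spec_next_referral_index_py (existing_referrals : List String) (prefix_ : String) (out : Int) : Prop := out = next_referral_index_py_alt existing_referrals prefix_
instance (existing_referrals : List String) (prefix_ : String) (out : Int) : Decidable (Spec_next_referral_index_py existing_referrals prefix_ out) := by unfold Spec_next_referral_index_py; infer_instance

-- ===== CLAIM (what is proved, stated in full; the proofs are below) =====
def Claim_equal_next_referral_index_py : Prop := ∀ (existing_referrals : List String) (prefix_ : String), Dom_next_referral_index_py existing_referrals prefix_ → Spec_next_referral_index_py existing_referrals prefix_ (next_referral_index_py existing_referrals prefix_)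

-- ===== LEMMAS AND PROOFS =====

-- A's while loop returns the least m ≥ n not in `used`
theorem pyWhileFree_spec (used : List Int) (n : Int) :
    n ≤ pyWhileFree used n ∧ pyWhileFree used n ∉ used ∧
      ∀ m, n ≤ m → m < pyWhileFree used n → m ∈ used := by
  fun_induction pyWhileFree used n with
  | case1 n h ih =>
    obtain ⟨h1, h2, h3⟩ := ih
    refine ⟨by omega, h2, ?_⟩
    intro m hm1 hm2
    rcases eq_or_lt_of_le hm1 with rfl | hlt
    · exact h
    · exact h3 m (by omega) hm2
  | case2 n h => exact ⟨le_refl n, h, fun m hm1 hm2 => absurd (lt_of_le_of_lt hm1 hm2) (lt_irrefl n)⟩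

-- B's ordered scan returns the least m ≥ e not in `vs`, provided `vs` is sorted
theorem pyScanExpected_spec (vs : List Int) (hs : vs.Pairwise (· ≤ ·)) (e : Int) :
    e ≤ pyScanExpected vs e ∧ pyScanExpected vs e ∉ vs ∧
      ∀ m, e ≤ m → m < pyScanExpected vs e → m ∈ vs := by
  induction vs generalizing e with
  | nil => exact ⟨le_refl e, by simp, fun m h1 h2 => absurd (lt_of_le_of_lt h1 h2) (lt_irrefl e)⟩
  | cons v t ih =>
    have hall : ∀ w ∈ t, v ≤ w := (List.pairwise_cons.mp hs).1
    have hst : t.Pairwise (· ≤ ·) := (List.pairwise_cons.mp hs).2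
    simp only [pyScanExpected]
    by_cases h1 : v < e
    · simp only [if_pos h1]
      obtain ⟨i1, i2, i3⟩ := ih hst e
      refine ⟨i1, ?_, ?_⟩
      · intro hmem
        rcases List.mem_cons.mp hmem with heq | hmem'
        · omega
        · exact i2 hmem'
      · intro m hm1 hm2; exact List.mem_cons_of_mem v (i3 m hm1 hm2)
    · by_cases h2 : v = e
      · simp only [if_neg h1, if_pos h2]
        obtain ⟨i1, i2, i3⟩ := ih hst (e + 1)
        refine ⟨by omega, ?_, ?_⟩
        · intro hmem
          rcases List.mem_cons.mp hmem with heq | hmem'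
          · omega
          · exact i2 hmem'
        · intro m hm1 hm2
          rcases eq_or_lt_of_le hm1 with rfl | hlt
          · exact List.mem_cons.mpr (Or.inl h2.symm)
          · exact List.mem_cons_of_mem v (i3 m (by omega) hm2)
      · simp only [if_neg h1, if_neg h2]
        refine ⟨le_refl e, ?_, fun m hm1 hm2 => absurd (lt_of_le_of_lt hm1 hm2) (lt_irrefl e)⟩
        intro hmem
        rcases List.mem_cons.mp hmem with heq | hmem'
        · omega
        · have := hall e hmem'; omega

-- the two parsing folds collect the same indices (as sets of values)
theorem pvFoldMem (cond dig : String → Bool) (val : String → Int) (l : List String)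
    (s : PySem.Set Int) (acc : List Int) (hinv : ∀ x : Int, x ∈ s ↔ x ∈ acc) :
    ∀ x : Int, x ∈ (l.foldl (fun a r =>
        if ¬ cond r then a else if dig r then PySem.Set.add a (val r) else a) s)
      ↔ x ∈ (l.foldl (fun a r =>
        if cond r then (if dig r then a ++ [val r] else a) else a) acc) := by
  induction l generalizing s acc with
  | nil => simpa using hinv
  | cons r t ih =>
    simp only [List.foldl_cons]
    by_cases hc : cond r
    · by_cases hd : dig r
      · simp only [hc, hd, not_true, if_false, if_true, ite_true, ite_false]
        apply ih
        intro x
        rw [PySem.Set.mem_add, hinv x]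
        simp [List.mem_append]
      · simp only [hc, hd, not_true, if_false, if_true, ite_true, ite_false]
        exact ih s acc hinv
    · simp only [hc, not_false_eq_true, ite_true, ite_false]
      exact ih s acc hinv

-- two "least elements ≥ 1 outside the same set" agree
theorem pvLeastUnique (r1 r2 : Int) (P : Int → Prop)
    (a1 : 1 ≤ r1) (a2 : ¬ P r1) (a3 : ∀ m, 1 ≤ m → m < r1 → P m)
    (b1 : 1 ≤ r2) (b2 : ¬ P r2) (b3 : ∀ m, 1 ≤ m → m < r2 → P m) : r1 = r2 := by
  rcases lt_trichotomy r1 r2 with h | h | h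
  · exact absurd (b3 r1 a1 h) a2
  · exact h
  · exact absurd (a3 r2 b1 h) b2

-- ===== VERDICT (by name: the statement is the Claim_ definition above) =====
theorem next_referral_index_py_spec : Claim_equal_next_referral_index_py := by
  intro ex p _
  show next_referral_index_py ex p = next_referral_index_py_alt ex p
  unfold next_referral_index_py next_referral_index_py_alt
  have hmem := pvFoldMem
    (fun r => PySem.Str.startswith r (p ++ "_"))
    (fun r => PySem.Str.strIsdigit (PySem.Str.slice r (some ((PySem.Str.len p : Int) + 1)) none))
    (fun r => (PySem.Int.ofStr? (PySem.Str.slice r (some ((PySem.Str.len p : Int) + 1)) none)).getD 0)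
    ex PySem.Set.empty [] (by simp [PySem.Set.empty])
  obtain ⟨a1, a2, a3⟩ := pyWhileFree_spec
    (ex.foldl (fun acc ref =>
      if ¬ (PySem.Str.startswith ref (p ++ "_")) then acc
      else if PySem.Str.strIsdigit (PySem.Str.slice ref (some ((PySem.Str.len p : Int) + 1)) none) then
        PySem.Set.add acc ((PySem.Int.ofStr? (PySem.Str.slice ref (some ((PySem.Str.len p : Int) + 1)) none)).getD 0)
      else acc) PySem.Set.empty) 1
  obtain ⟨b1, b2, b3⟩ := pyScanExpected_spec
    (PySem.List.sorted
      (ex.foldl (fun acc ref =>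
        if PySem.Str.startswith ref (p ++ "_") then
          if PySem.Str.strIsdigit (PySem.Str.slice ref (some ((PySem.Str.len p : Int) + 1)) none) then
            acc ++ [(PySem.Int.ofStr? (PySem.Str.slice ref (some ((PySem.Str.len p : Int) + 1)) none)).getD 0]
          else acc
        else acc) [])
      (fun x => x) false)
    (PySem.List.sorted_pairwise _ (fun x => x)) 1
  refine pvLeastUnique _ _ (fun m => m ∈ PySem.List.sorted
      (ex.foldl (fun acc ref =>
        if PySem.Str.startswith ref (p ++ "_") then
          if PySem.Str.strIsdigit (PySem.Str.slice ref (some ((PySem.Str.len p : Int) + 1)) none) then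
            acc ++ [(PySem.Int.ofStr? (PySem.Str.slice ref (some ((PySem.Str.len p : Int) + 1)) none)).getD 0]
          else acc
        else acc) [])
      (fun x => x) false)
    a1 (fun h => a2 ?_) (fun m h1 h2 => ?_) b1 b2 b3
  · exact (hmem _).mpr ((PySem.List.mem_sorted _ _ _ _).mp h)
  · exact (PySem.List.mem_sorted _ _ _ _).mpr ((hmem m).mp (a3 m h1 h2))
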